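-- pv_equiv track=rewrite | github.com/tcameronwaller/metabonet | metabonet/enhancement.py | change_reactions
-- ===== SOURCE A (Python) =====
-- import copy
--
-- def change_reactions(changer_reactions=None, reactions_original=None):
--     """
--     Changes information about specific reactions
--
--     arguments:
--         changer_reactions (list<dict<str>>): information to change about
--             specific reactions
--         reactions_original (dict<dict>): information about reactions
--
--     returns:
--         (dict<dict>): information about reactions
--
--     raises:
--
--     """
--
--     # Copy information
--     reactions_novel = copy.deepcopy(reactions_original)
--     for record in changer_reactions:
--         identifier_original = record["identifier_original"]
--         identifier_novel = record["identifier_novel"]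
--         name_original = record["name_original"]
--         name_novel = record["name_novel"]
--         # Determine method to change information
--         match_identifiers = identifier_original == identifier_novel
--         match_names = name_original == name_novel
--         if match_identifiers and not match_names:
--             # Change name
--             if identifier_original in reactions_novel:
--                 reactions_novel[identifier_original]["name"] = name_novel
--         elif match_names and not match_identifiers:
--             if identifier_original in reactions_novel:
--                 # Remove
--                 del reactions_novel[identifier_original]
--     # Return information
--     return reactions_novel
-- ===== SOURCE B (Python) =====
-- import copy
--
-- def change_reactions(changer_reactions=None, reactions_original=None):
--     # Per-key decision: for each reaction, scan the change records once to
--     # decide its fate (an applicable delete record removes it and dominates;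
--     # otherwise the last applicable rename record supplies its new name).
--     reactions_novel = {}
--     for key, value in reactions_original.items():
--         deleted = False
--         rename = None
--         for record in changer_reactions:
--             if record["identifier_original"] != key:
--                 continue
--             match_identifiers = record["identifier_original"] == record["identifier_novel"]
--             match_names = record["name_original"] == record["name_novel"]
--             if match_names and not match_identifiers:
--                 deleted = True
--                 break
--             if match_identifiers and not match_names:
--                 rename = record["name_novel"]
--         if deleted:
--             continue
--         record_novel = copy.deepcopy(value)
--         if rename is not None:
--             record_novel["name"] = rename
--         reactions_novel[key] = record_novel
--     return reactions_novel
-- ===== Notes on version B (the rewrite author's own statement) =====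
-- stated objective: alternative
-- what changed: B decides each reaction's fate independently by scanning the change records per key (an applicable delete dominates, otherwise the last applicable rename wins) instead of A's sequential in-place mutation of a deep copy of the whole dict.
import Mathlib
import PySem

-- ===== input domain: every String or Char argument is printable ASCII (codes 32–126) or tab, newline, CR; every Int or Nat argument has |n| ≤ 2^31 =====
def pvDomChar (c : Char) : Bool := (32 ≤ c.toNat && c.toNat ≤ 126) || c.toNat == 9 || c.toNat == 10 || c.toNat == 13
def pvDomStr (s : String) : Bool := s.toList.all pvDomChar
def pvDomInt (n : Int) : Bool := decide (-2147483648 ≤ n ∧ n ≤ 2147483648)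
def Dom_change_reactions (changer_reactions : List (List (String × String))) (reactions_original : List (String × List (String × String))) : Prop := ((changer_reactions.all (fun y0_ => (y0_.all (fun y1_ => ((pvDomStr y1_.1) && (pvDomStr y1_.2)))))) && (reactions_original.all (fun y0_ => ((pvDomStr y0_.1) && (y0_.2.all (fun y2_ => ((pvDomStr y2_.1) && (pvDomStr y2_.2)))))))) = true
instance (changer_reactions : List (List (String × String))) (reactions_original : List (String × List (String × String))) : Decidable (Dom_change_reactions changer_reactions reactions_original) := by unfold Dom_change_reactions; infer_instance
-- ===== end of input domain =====

-- B decides each reaction's fate independently by a per-key scan of the change records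
-- (an applicable delete dominates, otherwise the last applicable rename wins), instead of
-- A's sequential in-place mutation of a deep copy (objective: alternative; return value
-- only — neither implementation mutates its arguments).

-- ===== PORT A =====
-- one loop step of A: read the four fields of the record (KeyError → outside Pre_,
-- modelled as leaving the dict unchanged) and rename / delete in the evolving dict
def changeStepA (acc : PySem.Dict String (PySem.Dict String String)) (record : List (String × String)) : PySem.Dict String (PySem.Dict String String) :=
  match (PySem.Dict.mk record).get? "identifier_original", (PySem.Dict.mk record).get? "identifier_novel", (PySem.Dict.mk record).get? "name_original", (PySem.Dict.mk record).get? "name_novel" with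
  | some identifier_original, some identifier_novel, some name_original, some name_novel =>
    -- match_identifiers / match_names inlined
    if (identifier_original == identifier_novel) && !(name_original == name_novel) then
      if acc.contains identifier_original then
        acc.modify identifier_original PySem.Dict.empty (fun d => d.insert "name" name_novel)
      else acc
    else if (name_original == name_novel) && !(identifier_original == identifier_novel) then
      if acc.contains identifier_original then acc.erase identifier_original else acc
    else acc
  | _, _, _, _ => acc

def change_reactions (changer_reactions : List (List (String × String))) (reactions_original : List (String × List (String × String))) : List (String × List (String × String)) :=
  let reactions_novel := PySem.Dict.mk (reactions_original.map (fun p => (p.1, PySem.Dict.mk p.2)))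
  let final := changer_reactions.foldl changeStepA reactions_novel
  final.items.map (fun p => (p.1, p.2.items))

-- ===== PORT B =====
-- B's inner loop for one key: walk the change records carrying the current `rename`;
-- an applicable delete record breaks with `none` (the key is gone), the walk otherwise
-- ends with `some rename` (a record missing a field → outside Pre_, modelled as skip)
def scanKey (key : String) : List (List (String × String)) → Option String → Option (Option String)
  | [], rename => some rename
  | record :: rest, rename =>
    match (PySem.Dict.mk record).get? "identifier_original" with
    | none => scanKey key rest rename
    | some idOrig =>
      if idOrig != key then scanKey key rest rename
      else
        match (PySem.Dict.mk record).get? "identifier_novel", (PySem.Dict.mk record).get? "name_original", (PySem.Dict.mk record).get? "name_novel" with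
        | some idNov, some nameOrig, some nameNov =>
          if nameOrig == nameNov && idOrig != idNov then none
          else if idOrig == idNov && nameOrig != nameNov then scanKey key rest (some nameNov)
          else scanKey key rest rename
        | _, _, _ => scanKey key rest rename

-- `if rename is not None: record_novel["name"] = rename`
def applyRen : Option String → PySem.Dict String String → PySem.Dict String String
  | some m, d => d.insert "name" m
  | none, d => d

def change_reactions_alt (changer_reactions : List (List (String × String))) (reactions_original : List (String × List (String × String))) : List (String × List (String × String)) :=
  (reactions_original.foldl
    (fun reactions_novel p =>
      match scanKey p.1 changer_reactions none with
      | none => reactions_novel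
      | some rename => reactions_novel.insert p.1 (applyRen rename (PySem.Dict.mk p.2)).items)
    PySem.Dict.empty).items

-- ===== PRECONDITION & SPEC =====
-- Pre_ excludes (a) change records missing one of the four fields, on which Python A raises
-- KeyError, and (b) duplicate keys in reactions_original, which do not represent a Python dict.
def Pre_change_reactions (changer_reactions : List (List (String × String))) (reactions_original : List (String × List (String × String))) : Prop :=
  (∀ r ∈ changer_reactions,
      (PySem.Dict.mk r).contains "identifier_original" = true ∧
      (PySem.Dict.mk r).contains "identifier_novel" = true ∧
      (PySem.Dict.mk r).contains "name_original" = true ∧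
      (PySem.Dict.mk r).contains "name_novel" = true) ∧
  (reactions_original.map Prod.fst).Nodup
instance (changer_reactions : List (List (String × String))) (reactions_original : List (String × List (String × String))) : Decidable (Pre_change_reactions changer_reactions reactions_original) := by unfold Pre_change_reactions; infer_instance

def pvWitness_change_reactions : (List (List (String × String))) × (List (String × List (String × String))) :=
  ([[("identifier_original", "r1"), ("identifier_novel", "r1"), ("name_original", "a"), ("name_novel", "b")]],
   [("r1", [("name", "a")]), ("r2", [("name", "c")])])

def Spec_change_reactions (changer_reactions : List (List (String × String))) (reactions_original : List (String × List (String × String))) (out : List (String × List (String × String))) : Prop := out = change_reactions_alt changer_reactions reactions_original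
instance (changer_reactions : List (List (String × String))) (reactions_original : List (String × List (String × String))) (out : List (String × List (String × String))) : Decidable (Spec_change_reactions changer_reactions reactions_original out) := by unfold Spec_change_reactions; infer_instance

-- ===== CLAIM (what is proved, stated in full; the proofs are below) =====
def Claim_equal_change_reactions : Prop := ∀ (changer_reactions : List (List (String × String))) (reactions_original : List (String × List (String × String))), Dom_change_reactions changer_reactions reactions_original → Pre_change_reactions changer_reactions reactions_original → Spec_change_reactions changer_reactions reactions_original (change_reactions changer_reactions reactions_original)

-- ===== LEMMAS AND PROOFS =====

-- abbreviation used by the proofs: what B contributes for one dict entry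
def perKey (records : List (List (String × String))) (p : String × PySem.Dict String String) : Option (String × PySem.Dict String String) :=
  (scanKey p.1 records none).map (fun ren => (p.1, applyRen ren p.2))

-- shifting an already-applied rename into the accumulator
lemma scan_shift (k : String) : ∀ (rs : List (List (String × String))) (nn : String) (d : PySem.Dict String String),
    (scanKey k rs (some nn)).map (fun ren => applyRen ren d)
      = (scanKey k rs none).map (fun ren => applyRen ren (d.insert "name" nn)) := by
  intro rs
  induction rs with
  | nil => intro nn d; rfl
  | cons r rest ih =>
    intro nn d
    simp only [scanKey]
    cases h1 : (PySem.Dict.mk r).get? "identifier_original" with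
    | none => exact ih nn d
    | some io =>
      by_cases hk : (io != k) = true
      · simp only [hk, if_true]; exact ih nn d
      · simp only [hk, Bool.false_eq_true, if_false]
        cases h2 : (PySem.Dict.mk r).get? "identifier_novel" with
        | none => exact ih nn d
        | some inov =>
          cases h3 : (PySem.Dict.mk r).get? "name_original" with
          | none => exact ih nn d
          | some no =>
            cases h4 : (PySem.Dict.mk r).get? "name_novel" with
            | none => exact ih nn d
            | some nn' =>
              by_cases hdel : (no == nn' && io != inov) = true
              · simp only [hdel, if_true, Option.map_none]
              · simp only [hdel, Bool.false_eq_true, if_false]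
                by_cases hren : (io == inov && no != nn') = true
                · simp only [hren, if_true]
                  rw [ih nn' d, ih nn' (d.insert "name" nn),
                    PySem.Dict.insert_insert_self]
                · simp only [hren, Bool.false_eq_true, if_false]; exact ih nn d

-- guarded delete of A equals filtering the items
lemma guarded_erase_eq_filter (xs : List (String × PySem.Dict String String)) (io : String) :
    (if (PySem.Dict.mk xs).contains io then (PySem.Dict.mk xs).erase io else PySem.Dict.mk xs)
      = PySem.Dict.mk (xs.filter (fun p => !(p.1 == io))) := by
  by_cases h : (PySem.Dict.mk xs).contains io = true
  · simp [h, PySem.Dict.erase]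
  · have hall : ∀ p ∈ xs, (!(p.1 == io)) = true := by
      intro p hp
      by_contra hne
      apply h
      simp only [PySem.Dict.contains, List.any_eq_true]
      exact ⟨p, hp, by simpa using hne⟩
    simp [h, List.filter_eq_self.mpr hall]

-- guarded rename of A equals mapping over the items, given distinct keys
lemma guarded_modify_eq_map (xs : List (String × PySem.Dict String String))
    (hnd : (xs.map Prod.fst).Nodup) (io nn : String) :
    (if (PySem.Dict.mk xs).contains io then
        (PySem.Dict.mk xs).modify io PySem.Dict.empty (fun d => d.insert "name" nn)
      else PySem.Dict.mk xs)
      = PySem.Dict.mk (xs.map (fun p => if p.1 == io then (p.1, p.2.insert "name" nn) else p)) := by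
  by_cases hc : (PySem.Dict.mk xs).contains io = true
  · simp only [hc, if_true, PySem.Dict.modify, PySem.Dict.insert]
    congr 1
    apply List.map_congr_left
    intro p hp
    by_cases hio : (p.1 == io) = true
    · have hp1 : p.1 = io := by simpa using hio
      have hmem : (io, p.2) ∈ xs := by rw [← hp1]; simpa using hp
      have hkeys : (PySem.Dict.mk xs).keys.Nodup := hnd
      have hgd : (PySem.Dict.mk xs).getD io PySem.Dict.empty = p.2 :=
        PySem.Dict.getD_of_mem_items _ hmem hkeys _
      simp [hp1, hgd]
    · simp [hio]
  · have hnone : ∀ p ∈ xs, (p.1 == io) = false := by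
      intro p hp
      cases hb : (p.1 == io) with
      | false => rfl
      | true =>
        exact absurd (by simp only [PySem.Dict.contains, List.any_eq_true]; exact ⟨p, hp, hb⟩) hc
    have hmapid : xs.map (fun p => if p.1 == io then (p.1, p.2.insert "name" nn) else p) = xs := by
      conv_rhs => rw [← List.map_id xs]
      exact List.map_congr_left (fun p hp => by simp [hnone p hp])
    simp only [hc, Bool.false_eq_true, if_false, hmapid]

-- A's whole fold over the records computes B's per-key decision at every key
lemma foldA_eq : ∀ (records : List (List (String × String)))
    (l : List (String × PySem.Dict String String)), (l.map Prod.fst).Nodup →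
    records.foldl changeStepA (PySem.Dict.mk l) = PySem.Dict.mk (l.filterMap (perKey records)) := by
  intro records
  induction records with
  | nil =>
    intro l _
    simp only [List.foldl_nil]
    congr 1
    simp [perKey, scanKey, applyRen]
  | cons r rs ih =>
    intro l hnd
    simp only [List.foldl_cons]
    cases h1 : (PySem.Dict.mk r).get? "identifier_original" with
    | none =>
      have hstep : changeStepA (PySem.Dict.mk l) r = PySem.Dict.mk l := by
        simp [changeStepA, h1]
      rw [hstep, ih l hnd]
      congr 1
      apply List.filterMap_congr
      intro p _
      simp [perKey, scanKey, h1]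
    | some io =>
      cases h2 : (PySem.Dict.mk r).get? "identifier_novel" with
      | none =>
        have hstep : changeStepA (PySem.Dict.mk l) r = PySem.Dict.mk l := by
          simp [changeStepA, h1, h2]
        rw [hstep, ih l hnd]
        congr 1
        apply List.filterMap_congr
        intro p _
        simp [perKey, scanKey, h1, h2]
      | some inov =>
        cases h3 : (PySem.Dict.mk r).get? "name_original" with
        | none =>
          have hstep : changeStepA (PySem.Dict.mk l) r = PySem.Dict.mk l := by
            simp [changeStepA, h1, h2, h3]
          rw [hstep, ih l hnd]
          congr 1
          apply List.filterMap_congr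
          intro p _
          simp [perKey, scanKey, h1, h2, h3]
        | some no =>
          cases h4 : (PySem.Dict.mk r).get? "name_novel" with
          | none =>
            have hstep : changeStepA (PySem.Dict.mk l) r = PySem.Dict.mk l := by
              simp [changeStepA, h1, h2, h3, h4]
            rw [hstep, ih l hnd]
            congr 1
            apply List.filterMap_congr
            intro p _
            simp [perKey, scanKey, h1, h2, h3, h4]
          | some nn =>
            by_cases hb1 : ((io == inov) && !(no == nn)) = true
            · -- rename record
              have hb2 : ((no == nn) && !(io == inov)) = false := by
                revert hb1; cases hio : (io == inov) <;> cases hno : (no == nn) <;> simp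
              have hstep : changeStepA (PySem.Dict.mk l) r
                  = PySem.Dict.mk (l.map (fun p => if p.1 == io then (p.1, p.2.insert "name" nn) else p)) := by
                rw [← guarded_modify_eq_map l hnd io nn]
                simp only [changeStepA, h1, h2, h3, h4, hb1, if_true]
              have hnd' : ((l.map (fun p => if p.1 == io then (p.1, p.2.insert "name" nn) else p)).map Prod.fst).Nodup := by
                have : (l.map (fun p => if p.1 == io then (p.1, p.2.insert "name" nn) else p)).map Prod.fst = l.map Prod.fst := by
                  rw [List.map_map]
                  apply List.map_congr_left
                  intro p _
                  by_cases hp : (p.1 == io) = true <;> simp [Function.comp, hp]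
                rw [this]; exact hnd
              rw [hstep, ih _ hnd']
              congr 1
              rw [List.filterMap_map]
              apply List.filterMap_congr
              intro p _
              by_cases hk : p.1 = io
              · have hne : (io != p.1) = false := by simp [bne, hk]
                have hpe : (p.1 == io) = true := by simp [hk]
                have key := congrArg (Option.map (fun d => (p.1, d))) (scan_shift p.1 rs nn p.2)
                simp only [Option.map_map] at key
                simp only [Function.comp, perKey, scanKey, h1, h2, h3, h4, hne,
                  Bool.false_eq_true, if_false, hpe, if_true,
                  show ((no == nn) && (io != inov)) = false by simpa [bne] using hb2,
                  show ((io == inov) && (no != nn)) = true by simpa [bne] using hb1]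
                exact key.symm
              · have hne : (io != p.1) = true := by simp [bne]; exact fun h => hk h.symm
                have hpe : (p.1 == io) = false := by simp [hk]
                simp only [Function.comp, perKey, scanKey, h1, hne, if_true, hpe,
                  Bool.false_eq_true, if_false]
            · by_cases hb2 : ((no == nn) && !(io == inov)) = true
              · -- delete record
                have hstep : changeStepA (PySem.Dict.mk l) r
                    = PySem.Dict.mk (l.filter (fun p => !(p.1 == io))) := by
                  rw [← guarded_erase_eq_filter l io]
                  simp only [changeStepA, h1, h2, h3, h4, hb1, Bool.false_eq_true,
                    if_false, hb2, if_true]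
                have hnd' : ((l.filter (fun p => !(p.1 == io))).map Prod.fst).Nodup :=
                  hnd.sublist (List.filter_sublist.map Prod.fst)
                rw [hstep, ih _ hnd', List.filterMap_filter]
                congr 1
                apply List.filterMap_congr
                intro p _
                by_cases hk : p.1 = io
                · have hne : (io != p.1) = false := by simp [bne, hk]
                  have hpe : (p.1 == io) = true := by simp [hk]
                  simp only [perKey, scanKey, h1, h2, h3, h4, hne, Bool.false_eq_true,
                    if_false, hpe, Bool.not_true,
                    show ((no == nn) && (io != inov)) = true by simpa [bne] using hb2,
                    if_true, Option.map_none]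
                · have hne : (io != p.1) = true := by simp [bne]; exact fun h => hk h.symm
                  have hpe : (p.1 == io) = false := by simp [hk]
                  simp only [perKey, scanKey, h1, hne, if_true, hpe, Bool.not_false]
              · -- no-op record
                have hstep : changeStepA (PySem.Dict.mk l) r = PySem.Dict.mk l := by
                  simp only [changeStepA, h1, h2, h3, h4, hb1, Bool.false_eq_true,
                    if_false, hb2]
                rw [hstep, ih l hnd]
                congr 1
                apply List.filterMap_congr
                intro p _
                simp only [perKey, scanKey, h1, h2, h3, h4,
                  show ((no == nn) && (io != inov)) = false by simpa [bne] using hb2,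
                  show ((io == inov) && (no != nn)) = false by simpa [bne] using hb1,
                  Bool.false_eq_true, if_false, ite_self]

-- B's rebuild pass lists exactly the kept keys in order
lemma rebuild_eq (cr : List (List (String × String))) :
    ∀ (l : List (String × List (String × String)))
      (res : PySem.Dict String (List (String × String))),
      (l.map Prod.fst).Nodup →
      (∀ k ∈ l.map Prod.fst, res.contains k = false) →
      (l.foldl
          (fun reactions_novel p =>
            match scanKey p.1 cr none with
            | none => reactions_novel
            | some rename => reactions_novel.insert p.1 (applyRen rename (PySem.Dict.mk p.2)).items)
          res).items
        = res.items
          ++ l.filterMap (fun p =>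
              (scanKey p.1 cr none).map (fun ren => (p.1, (applyRen ren (PySem.Dict.mk p.2)).items))) := by
  intro l
  induction l with
  | nil => intro res _ _; simp
  | cons p t ih =>
    intro res hnd hdisj
    cases p with
    | mk k v =>
      simp only [List.map_cons, List.nodup_cons] at hnd
      obtain ⟨hk, hndt⟩ := hnd
      cases hscan : scanKey k cr none with
      | none =>
        simp only [List.foldl_cons, hscan]
        rw [ih res hndt (fun k' hk' => hdisj k' (by simp [hk']))]
        simp [hscan]
      | some ren =>
        have hres : res.contains k = false := hdisj k (by simp)
        simp only [List.foldl_cons, hscan]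
        rw [ih (res.insert k (applyRen ren (PySem.Dict.mk v)).items) hndt ?_]
        · simp only [PySem.Dict.insert, hres, Bool.false_eq_true, if_false]
          simp [hscan]
        · intro k' hk'
          have hne : k' ≠ k := fun he => hk (he ▸ hk')
          have h0 : res.contains k' = false := hdisj k' (by simp [hk'])
          rw [PySem.Dict.contains_insert]
          simp [hne, h0]

-- ===== VERDICT (by name: the statement is the Claim_ definition above) =====
theorem change_reactions_spec : Claim_equal_change_reactions := by
  intro cr ro _ hpre
  obtain ⟨_, hnd⟩ := hpre
  show change_reactions cr ro = change_reactions_alt cr ro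
  have hndm : ((ro.map (fun p => (p.1, PySem.Dict.mk p.2))).map Prod.fst).Nodup := by
    simpa [List.map_map, Function.comp] using hnd
  simp only [change_reactions, change_reactions_alt]
  rw [foldA_eq cr _ hndm,
    rebuild_eq cr ro PySem.Dict.empty hnd
      (fun k _ => by simp [PySem.Dict.contains, PySem.Dict.empty])]
  rw [show (PySem.Dict.empty : PySem.Dict String (List (String × String))).items = [] from rfl,
    List.nil_append]
  show (((ro.map (fun p => (p.1, PySem.Dict.mk p.2))).filterMap (perKey cr)).map
      (fun p => (p.1, p.2.items))) = _
  rw [List.map_filterMap, List.filterMap_map]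
  apply List.filterMap_congr
  intro p _
  simp only [Function.comp, perKey, Option.map_map]
  rfl
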